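-- pv_equiv track=rewrite | github.com/shaswat-13/python-projects | projects/experiments/bagels.py | check_clues
-- ===== SOURCE A (Python) =====
-- def check_clues(guess, actual):
--     clues = []
--
--     for i in range(len(guess)):
--         if guess[i] == actual[i]:
--             clues.append("Fermi")
--         elif guess[i] in actual:
--             clues.append("Pico")
--
--     if not clues:
--         clues.append("Bagels")
--
--     clues.sort()
--     return " ".join(clues)
-- ===== SOURCE B (Python) =====
-- def check_clues(guess, actual):
--     nf = 0
--     np = 0
--     for i in range(len(guess)):
--         if guess[i] == actual[i]:
--             nf += 1
--         elif guess[i] in actual: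
--             np += 1
--     if nf == 0 and np == 0:
--         return "Bagels"
--     return " ".join(["Fermi"] * nf + ["Pico"] * np)
-- ===== Notes on version B (the rewrite author's own statement) =====
-- stated objective: simpler
-- what changed: B keeps two integer counters instead of building a clue list, and emits the result directly as Fermi-tokens before Pico-tokens, eliminating A's list construction and sort (sorted output is always all Fermi then all Pico).
import Mathlib
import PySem

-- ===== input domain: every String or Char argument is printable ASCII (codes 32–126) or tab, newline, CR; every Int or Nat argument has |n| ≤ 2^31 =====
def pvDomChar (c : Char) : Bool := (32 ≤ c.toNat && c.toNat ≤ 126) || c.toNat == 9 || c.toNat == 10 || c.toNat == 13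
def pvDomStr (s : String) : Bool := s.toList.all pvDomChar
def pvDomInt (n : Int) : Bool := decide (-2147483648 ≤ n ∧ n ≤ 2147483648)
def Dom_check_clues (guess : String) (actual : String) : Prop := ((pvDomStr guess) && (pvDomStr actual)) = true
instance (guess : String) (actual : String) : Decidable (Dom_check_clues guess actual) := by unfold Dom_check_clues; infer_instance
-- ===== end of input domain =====

-- B replaces A's clue-list-plus-sort with two counters and a closed-form output (simpler; sorted clues are always all "Fermi" then all "Pico"); Pre_ excludes the length mismatch on which both Pythons raise IndexError.
-- ===== PORT A =====
def check_clues (guess : String) (actual : String) : String :=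
  let g := guess.toList
  let a := actual.toList
  let clues := (PySem.List.pyRange 0 (g.length : Int) 1).foldl (fun clues i =>
    if PySem.List.pyGetD g i ' ' = PySem.List.pyGetD a i ' ' then clues ++ ["Fermi"]
    else if PySem.List.pyGetD g i ' ' ∈ a then clues ++ ["Pico"]  -- 1-char needle: substring test = char membership
    else clues) []
  let clues := if clues = [] then ["Bagels"] else clues
  PySem.Str.join " " (PySem.List.sorted clues (fun x => x) false)

-- ===== PORT B =====
def check_clues_alt (guess : String) (actual : String) : String :=
  let g := guess.toList
  let a := actual.toList
  let p := (PySem.List.pyRange 0 (g.length : Int) 1).foldl (fun (p : Int × Int) i =>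
    if PySem.List.pyGetD g i ' ' = PySem.List.pyGetD a i ' ' then (p.1 + 1, p.2)
    else if PySem.List.pyGetD g i ' ' ∈ a then (p.1, p.2 + 1)  -- 1-char needle: substring test = char membership
    else p) (0, 0)
  if p.1 = 0 ∧ p.2 = 0 then "Bagels"
  else PySem.Str.join " " (List.replicate p.1.toNat "Fermi" ++ List.replicate p.2.toNat "Pico")

-- ===== PRECONDITION & SPEC =====
-- Pre_ excludes exactly the inputs (len(guess) > len(actual)) on which A raises IndexError at actual[i].
def Pre_check_clues (guess : String) (actual : String) : Prop :=
  guess.toList.length ≤ actual.toList.length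
instance (guess : String) (actual : String) : Decidable (Pre_check_clues guess actual) := by
  unfold Pre_check_clues; infer_instance
def pvWitness_check_clues : String × String := ("123", "321")
def Spec_check_clues (guess : String) (actual : String) (out : String) : Prop := out = check_clues_alt guess actual
instance (guess : String) (actual : String) (out : String) : Decidable (Spec_check_clues guess actual out) := by unfold Spec_check_clues; infer_instance

-- ===== CLAIM (what is proved, stated in full; the proofs are below) =====
def Claim_equal_check_clues : Prop := ∀ (guess : String) (actual : String), Dom_check_clues guess actual → Pre_check_clues guess actual → Spec_check_clues guess actual (check_clues guess actual)

-- ===== LEMMAS AND PROOFS =====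

-- the two step functions
def pvStepA (g a : List Char) (clues : List String) (i : Int) : List String :=
  if PySem.List.pyGetD g i ' ' = PySem.List.pyGetD a i ' ' then clues ++ ["Fermi"]
  else if PySem.List.pyGetD g i ' ' ∈ a then clues ++ ["Pico"]
  else clues

def pvStepB (g a : List Char) (p : Int × Int) (i : Int) : Int × Int :=
  if PySem.List.pyGetD g i ' ' = PySem.List.pyGetD a i ' ' then (p.1 + 1, p.2)
  else if PySem.List.pyGetD g i ' ' ∈ a then (p.1, p.2 + 1)
  else p

lemma pvElems (g a : List Char) (L : List Int) (clues : List String)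
    (h : ∀ x ∈ clues, x = "Fermi" ∨ x = "Pico") :
    ∀ x ∈ L.foldl (pvStepA g a) clues, x = "Fermi" ∨ x = "Pico" := by
  induction L generalizing clues with
  | nil => simpa using h
  | cons i t ih =>
      simp only [List.foldl_cons]
      apply ih
      intro x hx
      unfold pvStepA at hx
      split_ifs at hx
      · rcases List.mem_append.mp hx with hx | hx
        · exact h x hx
        · left; simpa using hx
      · rcases List.mem_append.mp hx with hx | hx
        · exact h x hx
        · right; simpa using hx
      · exact h x hx

lemma pvCounts (g a : List Char) (L : List Int) (clues : List String) :
    L.foldl (pvStepB g a) ((clues.count "Fermi" : Int), (clues.count "Pico" : Int))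
      = (((L.foldl (pvStepA g a) clues).count "Fermi" : Int),
         ((L.foldl (pvStepA g a) clues).count "Pico" : Int)) := by
  induction L generalizing clues with
  | nil => rfl
  | cons i t ih =>
      simp only [List.foldl_cons]
      have : pvStepB g a ((clues.count "Fermi" : Int), (clues.count "Pico" : Int)) i
          = (((pvStepA g a clues i).count "Fermi" : Int), ((pvStepA g a clues i).count "Pico" : Int)) := by
        unfold pvStepA pvStepB
        split_ifs <;> simp [List.count_append]
      rw [this, ih]

-- a list of "Fermi"/"Pico" tokens, sorted, is its Fermi's then its Pico's
lemma pvPerm (l : List String) (h : ∀ x ∈ l, x = "Fermi" ∨ x = "Pico") :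
    (List.replicate (l.count "Fermi") "Fermi" ++ List.replicate (l.count "Pico") "Pico").Perm l := by
  induction l with
  | nil => simp
  | cons x t ih =>
      have ht := ih (fun y hy => h y (List.mem_cons_of_mem _ hy))
      rcases h x (List.mem_cons_self) with hx | hx <;> subst hx
      · have : ("Fermi" :: t).count "Fermi" = t.count "Fermi" + 1 := by simp
        rw [this]
        have : ("Fermi" :: t).count "Pico" = t.count "Pico" := by simp
        rw [this, List.replicate_succ, List.cons_append]
        exact ht.cons _
      · have h1 : ("Pico" :: t).count "Fermi" = t.count "Fermi" := by simp
        have h2 : ("Pico" :: t).count "Pico" = t.count "Pico" + 1 := by simp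
        rw [h1, h2, List.replicate_succ]
        exact List.perm_middle.trans (ht.cons _)

lemma pvSortedShape (l : List String) (h : ∀ x ∈ l, x = "Fermi" ∨ x = "Pico") :
    PySem.List.sorted l (fun x => x) false
      = List.replicate (l.count "Fermi") "Fermi" ++ List.replicate (l.count "Pico") "Pico" := by
  refine PySem.List.sorted_id_eq_of_perm_of_pairwise l _ (pvPerm l h) ?_
  rw [List.pairwise_append]
  refine ⟨?_, ?_, ?_⟩
  · exact List.pairwise_replicate.mpr (Or.inr le_rfl)
  · exact List.pairwise_replicate.mpr (Or.inr le_rfl)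
  · intro x hx y hy
    rw [List.eq_of_mem_replicate hx, List.eq_of_mem_replicate hy]
    have : ("Fermi" : String) < "Pico" := by
      rw [String.lt_iff_toList_lt]; decide
    exact le_of_lt this

lemma pvCountsPos (l : List String) (h : ∀ x ∈ l, x = "Fermi" ∨ x = "Pico") (hne : l ≠ []) :
    ¬ (l.count "Fermi" = 0 ∧ l.count "Pico" = 0) := by
  rcases l with _ | ⟨x, t⟩
  · exact absurd rfl hne
  · rcases h x List.mem_cons_self with hx | hx <;> subst hx <;>
      simp

lemma pvMain (g a : List Char) :
    PySem.Str.join " " (PySem.List.sorted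
        (if (PySem.List.pyRange 0 (g.length : Int) 1).foldl (pvStepA g a) [] = []
         then ["Bagels"]
         else (PySem.List.pyRange 0 (g.length : Int) 1).foldl (pvStepA g a) [])
        (fun x => x) false)
      = (if ((PySem.List.pyRange 0 (g.length : Int) 1).foldl (pvStepB g a) (0, 0)).1 = 0 ∧
            ((PySem.List.pyRange 0 (g.length : Int) 1).foldl (pvStepB g a) (0, 0)).2 = 0
         then "Bagels"
         else PySem.Str.join " "
            (List.replicate ((PySem.List.pyRange 0 (g.length : Int) 1).foldl (pvStepB g a) (0, 0)).1.toNat "Fermi" ++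
             List.replicate ((PySem.List.pyRange 0 (g.length : Int) 1).foldl (pvStepB g a) (0, 0)).2.toNat "Pico")) := by
  set L := PySem.List.pyRange 0 (g.length : Int) 1 with hL
  set clues := L.foldl (pvStepA g a) [] with hclues
  have helems : ∀ x ∈ clues, x = "Fermi" ∨ x = "Pico" := pvElems g a L [] (by simp)
  have hcnt : L.foldl (pvStepB g a) (0, 0)
      = ((clues.count "Fermi" : Int), (clues.count "Pico" : Int)) := by
    simpa [hclues] using pvCounts g a L []
  rw [hcnt]
  dsimp only
  by_cases hnil : clues = []
  · rw [if_pos hnil, hnil]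
    simp only [List.count_nil, Nat.cast_zero]
    norm_num
    decide
  · have hpos := pvCountsPos clues helems hnil
    rw [if_neg hnil, pvSortedShape clues helems]
    split_ifs with hc
    · exact absurd ⟨by exact_mod_cast hc.1, by exact_mod_cast hc.2⟩ hpos
    · simp

-- ===== VERDICT (by name: the statement is the Claim_ definition above) =====
theorem check_clues_spec : Claim_equal_check_clues := by
  intro guess actual _ _
  exact pvMain guess.toList actual.toList
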